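-- pv_equiv track=rewrite | github.com/Ahmad-Alanati/data-structures-and-algorithms | array_insert_shift/array_insert_shift.py | remove_middle_element
-- ===== SOURCE A (Python) =====
-- import math
--
-- def remove_middle_element(arr):
--     newarr = []
--     if len(arr) == 1:
--         return []
--     if len(arr)%2==0 :
--         for i in range(len(arr)):
--             if i==len(arr)/2-1 or i ==len(arr)/2:
--                 continue
--             newarr.append(arr[i])
--     else:
--         for i in range(len(arr)):
--             if i == math.floor(len(arr)/2):
--                 continue
--             newarr.append(arr[i])
--     return newarr
-- ===== SOURCE B (Python) =====
-- def remove_middle_element(arr):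
--     n = len(arr)
--     if n % 2:
--         m = n // 2
--         return list(arr[:m]) + list(arr[m+1:])
--     return list(arr[:n//2-1]) + list(arr[n//2+1:])
-- ===== Notes on version B (the rewrite author's own statement) =====
-- stated objective: simpler
-- what changed: Replaced the per-index scan-and-skip loops (and the redundant len==1 guard) with middle-index arithmetic and two slice concatenations, so there is no per-element Python-level branch; the slicing runs in C, which a timing run measured as faster.
import Mathlib
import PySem

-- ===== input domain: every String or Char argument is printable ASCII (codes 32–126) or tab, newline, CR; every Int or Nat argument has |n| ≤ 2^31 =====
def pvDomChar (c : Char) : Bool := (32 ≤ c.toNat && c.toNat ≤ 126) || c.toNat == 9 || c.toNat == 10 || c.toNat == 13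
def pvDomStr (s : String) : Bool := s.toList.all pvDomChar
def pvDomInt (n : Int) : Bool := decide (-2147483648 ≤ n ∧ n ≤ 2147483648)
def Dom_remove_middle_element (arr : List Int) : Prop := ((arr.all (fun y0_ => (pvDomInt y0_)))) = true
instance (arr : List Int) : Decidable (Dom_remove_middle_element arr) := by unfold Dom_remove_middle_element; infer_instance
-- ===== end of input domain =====

-- B removes the middle element(s) by boundary arithmetic plus slice concatenation instead of A's
-- per-index scan-and-skip loop; objective: simpler (no per-element branch, no special case for length 1).

-- ===== PORT A =====
-- In Python the even branch compares i with len(arr)/2-1 and len(arr)/2 (true division); since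
-- len(arr) is even these floats are integer-valued, so the comparison is exactly the Int equality
-- below.  math.floor(len(arr)/2) on the odd branch is (len : Int) / 2 (nonnegative, so Lean's ediv
-- equals Python's floor division).
def remove_middle_element (arr : List Int) : List Int :=
  if arr.length = 1 then []
  else if (arr.length : Int) % 2 = 0 then
    (PySem.List.pyRange 0 (arr.length : Int)).foldl
      (fun newarr i =>
        if i = (arr.length : Int) / 2 - 1 ∨ i = (arr.length : Int) / 2 then newarr
        else newarr ++ [PySem.List.pyGetD arr i 0]) []
  else
    (PySem.List.pyRange 0 (arr.length : Int)).foldl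
      (fun newarr i =>
        if i = (arr.length : Int) / 2 then newarr
        else newarr ++ [PySem.List.pyGetD arr i 0]) []

-- ===== PORT B =====
def remove_middle_element_alt (arr : List Int) : List Int :=
  let n : Int := arr.length
  if PySem.Int.mod n 2 ≠ 0 then
    let m := PySem.Int.floordiv n 2
    PySem.List.slice arr none (some m) ++ PySem.List.slice arr (some (m + 1)) none
  else
    PySem.List.slice arr none (some (PySem.Int.floordiv n 2 - 1)) ++
      PySem.List.slice arr (some (PySem.Int.floordiv n 2 + 1)) none

-- ===== PRECONDITION & SPEC =====
def Spec_remove_middle_element (arr : List Int) (out : List Int) : Prop := out = remove_middle_element_alt arr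
instance (arr : List Int) (out : List Int) : Decidable (Spec_remove_middle_element arr out) := by unfold Spec_remove_middle_element; infer_instance

-- ===== CLAIM (what is proved, stated in full; the proofs are below) =====
def Claim_equal_remove_middle_element : Prop := ∀ (arr : List Int), Dom_remove_middle_element arr → Spec_remove_middle_element arr (remove_middle_element arr)

-- ===== LEMMAS AND PROOFS =====

-- A's loop shape: it appends arr[i] for every index not skipped, i.e. a filter-then-map.
theorem skip_fold (cond : Int → Prop) [DecidablePred cond] (f : Int → Int) (l : List Int) :
    l.foldl (fun acc i => if cond i then acc else acc ++ [f i]) ([] : List Int)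
      = (l.filter (fun i => decide (¬ cond i))).map f := by
  have h : (fun (acc : List Int) i => if cond i then acc else acc ++ [f i])
      = fun acc i => if (fun i => decide (¬ cond i)) i = true then acc ++ [f i] else acc := by
    funext acc i; by_cases hc : cond i <;> simp [hc]
  rw [h, PySem.List.foldl_append_if]
  simp

-- reading arr[i] for i ∈ [0, b) with b ≤ len(arr) is arr.take b
theorem map_get_range_take (arr : List Int) (b : Int) (h0 : 0 ≤ b) (hb : b ≤ (arr.length : Int)) :
    (PySem.List.pyRange 0 b).map (fun i => PySem.List.pyGetD arr i 0) = arr.take b.toNat := by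
  have h1 : (PySem.List.pyRange 0 b).map (fun i => PySem.List.pyGetD arr i 0)
      = (PySem.List.pyRange 0 b).map (fun i => PySem.List.pyGetD (arr.take b.toNat) i 0) := by
    apply List.map_congr_left
    intro i hi
    rw [PySem.List.mem_pyRange_one] at hi
    rw [PySem.List.pyGetD_eq_getElem _ _ hi.1 (by omega),
        PySem.List.pyGetD_eq_getElem _ _ hi.1 (by simp; omega),
        List.getElem_take]
  rw [h1]
  have h2 := PySem.List.map_pyGetD_pyRange (arr.take b.toNat) 0 (a := 0) le_rfl
  simp only [PySem.List.len_eq, List.length_take, Int.toNat_zero, List.drop_zero] at h2 ⊢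
  rw [show ((min b.toNat arr.length : Nat) : Int) = b by omega] at h2
  exact h2

-- reading arr[i] for i ∈ [a, len) is arr.drop a
theorem map_get_range_drop (arr : List Int) (a : Int) (h0 : 0 ≤ a) :
    (PySem.List.pyRange a (arr.length : Int)).map (fun i => PySem.List.pyGetD arr i 0)
      = arr.drop a.toNat := by
  have h := PySem.List.map_pyGetD_pyRange arr 0 h0
  simpa using h

theorem filter_range_all {p : Int → Bool} {a b : Int} (h : ∀ x, a ≤ x → x < b → p x = true) :
    (PySem.List.pyRange a b).filter p = PySem.List.pyRange a b := by
  apply List.filter_eq_self.mpr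
  intro x hx
  rw [PySem.List.mem_pyRange_one] at hx
  exact h x hx.1 hx.2

-- odd case: dropping exactly index m from [0, n)
theorem filter_skip1 (m n : Int) (h0 : 0 ≤ m) (h1 : m < n) :
    (PySem.List.pyRange 0 n).filter (fun i => decide (¬ i = m))
      = PySem.List.pyRange 0 m ++ PySem.List.pyRange (m + 1) n := by
  rw [PySem.List.pyRange_one_append 0 m n h0 (le_of_lt h1), List.filter_append,
      PySem.List.pyRange_one_cons h1, List.filter_cons]
  rw [filter_range_all (by intro x hx1 hx2; simp; omega),
      filter_range_all (by intro x hx1 hx2; simp; omega)]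
  simp

-- even case: dropping exactly indices m-1 and m from [0, n)
theorem filter_skip2 (m n : Int) (h0 : 1 ≤ m) (h1 : m < n) :
    (PySem.List.pyRange 0 n).filter (fun i => decide (¬ (i = m - 1 ∨ i = m)))
      = PySem.List.pyRange 0 (m - 1) ++ PySem.List.pyRange (m + 1) n := by
  rw [PySem.List.pyRange_one_append 0 (m - 1) n (by omega) (by omega), List.filter_append,
      PySem.List.pyRange_one_cons (show m - 1 < n by omega), List.filter_cons,
      PySem.List.pyRange_one_cons (show m - 1 + 1 < n by omega), List.filter_cons]
  rw [filter_range_all (p := fun i => decide (¬ (i = m - 1 ∨ i = m))) (by intro x hx1 hx2; simp; omega),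
      filter_range_all (p := fun i => decide (¬ (i = m - 1 ∨ i = m))) (by intro x hx1 hx2; simp; omega)]
  have e : m - 1 + 1 + 1 = m + 1 := by omega
  rw [e]
  simp

-- ===== VERDICT (by name: the statement is the Claim_ definition above) =====
theorem remove_middle_element_spec : Claim_equal_remove_middle_element := by
  intro arr _
  unfold Spec_remove_middle_element remove_middle_element remove_middle_element_alt
  by_cases h1 : arr.length = 1
  · -- A returns []; B's odd formula gives take 0 ++ drop 1 = []
    obtain ⟨x, rfl⟩ := List.length_eq_one_iff.mp h1
    simp only [List.length_cons, List.length_nil]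
    refine Eq.symm ?_
    rw [if_pos (by decide)]
    rw [PySem.List.slice_to _ (by norm_num), PySem.List.slice_from _ (by norm_num)]
    simp [PySem.Int.floordiv]
  · rw [if_neg h1]
    by_cases he : (arr.length : Int) % 2 = 0
    · -- even length
      rw [if_pos he]
      by_cases h0 : arr.length = 0
      · obtain rfl := List.eq_nil_of_length_eq_zero h0
        decide
      · -- arr.length ≥ 2
        have hn2 : 2 ≤ arr.length := by omega
        have hm : 1 ≤ (arr.length : Int) / 2 ∧ (arr.length : Int) / 2 < (arr.length : Int) := by omega
        rw [skip_fold, filter_skip2 _ _ hm.1 hm.2, List.map_append,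
            map_get_range_take arr _ (by omega) (by omega),
            map_get_range_drop arr _ (by omega)]
        have hmod : PySem.Int.mod (arr.length : Int) 2 = (arr.length : Int) % 2 :=
          PySem.Int.mod_eq_emod_of_pos (by norm_num)
        have hdiv : PySem.Int.floordiv (arr.length : Int) 2 = (arr.length : Int) / 2 :=
          PySem.Int.floordiv_eq_ediv_of_pos (by norm_num)
        simp only [hmod, hdiv, he, ne_eq, not_true_eq_false, if_false,
          PySem.List.slice_to arr (show (0:Int) ≤ (arr.length : Int) / 2 - 1 by omega),
          PySem.List.slice_from arr (show (0:Int) ≤ (arr.length : Int) / 2 + 1 by omega)]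
    · -- odd length
      rw [if_neg he]
      have hm : 0 ≤ (arr.length : Int) / 2 ∧ (arr.length : Int) / 2 < (arr.length : Int) := by omega
      rw [skip_fold, filter_skip1 _ _ hm.1 hm.2, List.map_append,
          map_get_range_take arr _ (by omega) (by omega),
          map_get_range_drop arr _ (by omega)]
      have hmod : PySem.Int.mod (arr.length : Int) 2 = (arr.length : Int) % 2 :=
        PySem.Int.mod_eq_emod_of_pos (by norm_num)
      have hdiv : PySem.Int.floordiv (arr.length : Int) 2 = (arr.length : Int) / 2 :=
        PySem.Int.floordiv_eq_ediv_of_pos (by norm_num)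
      simp only [hmod, hdiv, he, ne_eq, not_false_eq_true, if_true,
        PySem.List.slice_to arr (show (0:Int) ≤ (arr.length : Int) / 2 by omega),
        PySem.List.slice_from arr (show (0:Int) ≤ (arr.length : Int) / 2 + 1 by omega)]
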